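-- pv_equiv track=rewrite | github.com/jacky661220/ITP | app_combined.py | is_shortener
-- ===== SOURCE A (Python) =====
-- SHORTENER_DOMAINS = {
--     "bit.ly", "t.co", "goo.gl", "tinyurl.com", "ow.ly", "buff.ly", "rebrand.ly",
--     "is.gd", "t.ly", "cutt.ly", "mcaf.ee", "s.id", "lnkd.in", "fb.me", "yhoo.it",
--     "trib.al", "ift.tt", "dlvr.it", "supr.link", "shorte.st", "adf.ly", "rb.gy",
--     "shorturl.at", "bit.do", "v.gd", "qr.ae", "amzn.to", "m.tb.cn",
--     "vk.cc", "x.co", "u.to", "clck.ru", "2.gp", "spr.ly", "snip.ly",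
--     "t.cn", "t2m.io", "urlz.fr", "short.cm", "kutt.it",
-- }
--
-- def is_shortener(host: str) -> bool:
--     host = (host or "").lower().strip()
--     if not host:
--         return False
--     # Subdomains are also treated as shorteners
--     for dom in SHORTENER_DOMAINS:
--         if host == dom or host.endswith("." + dom):
--             return True
--     return False
-- ===== SOURCE B (Python) =====
-- # The shortener table precomputed as label sequences in reverse order
-- # ("bit.ly" -> ("ly", "bit")): suffix match at dot boundaries becomes a
-- # prefix walk over the reversed labels of the host.
-- REV_LABELS = {
--     ("ly", "bit"), ("co", "t"), ("gl", "goo"), ("com", "tinyurl"),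
--     ("ly", "ow"), ("ly", "buff"), ("ly", "rebrand"), ("gd", "is"),
--     ("ly", "t"), ("ly", "cutt"), ("ee", "mcaf"), ("id", "s"),
--     ("in", "lnkd"), ("me", "fb"), ("it", "yhoo"), ("al", "trib"),
--     ("tt", "ift"), ("it", "dlvr"), ("link", "supr"), ("st", "shorte"),
--     ("ly", "adf"), ("gy", "rb"), ("at", "shorturl"), ("do", "bit"),
--     ("gd", "v"), ("ae", "qr"), ("to", "amzn"), ("cn", "tb", "m"),
--     ("cc", "vk"), ("co", "x"), ("to", "u"), ("ru", "clck"),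
--     ("gp", "2"), ("ly", "spr"), ("ly", "snip"), ("cn", "t"),
--     ("io", "t2m"), ("fr", "urlz"), ("cm", "short"), ("it", "kutt"),
-- }
--
-- def is_shortener(host: str) -> bool:
--     host = (host or "").lower().strip()
--     if not host:
--         return False
--     key = ()
--     for label in reversed(host.split(".")):
--         key = key + (label,)
--         if key in REV_LABELS:
--             return True
--     return False
-- ===== Notes on version B (the rewrite author's own statement) =====
-- stated objective: alternative
-- what changed: B replaces A's scan over the 40-domain set with endswith by a precomputed set of reversed label tuples: it splits the normalized host at dots, walks its reversed labels accumulating a key tuple, and hash-checks each key, so the loop ranges over the host's own dot-boundary suffixes instead of the domain collection.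
import Mathlib
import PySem

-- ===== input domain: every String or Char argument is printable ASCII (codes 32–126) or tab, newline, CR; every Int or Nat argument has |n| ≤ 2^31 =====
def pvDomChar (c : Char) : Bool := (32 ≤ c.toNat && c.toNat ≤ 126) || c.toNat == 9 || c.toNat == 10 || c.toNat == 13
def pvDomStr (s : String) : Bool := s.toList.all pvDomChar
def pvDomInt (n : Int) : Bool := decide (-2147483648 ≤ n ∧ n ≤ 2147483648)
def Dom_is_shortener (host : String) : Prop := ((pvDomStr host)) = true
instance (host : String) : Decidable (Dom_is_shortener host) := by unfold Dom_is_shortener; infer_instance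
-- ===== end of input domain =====

-- B stores the shortener table as reversed label tuples and walks the host's own
-- reversed labels with hash lookups, instead of A's endswith scan over every domain
-- (objective: alternative; same return value).

-- ===== PORT A =====
-- the module-level set SHORTENER_DOMAINS (distinct elements, as char lists)
def shortenerDoms : List (List Char) :=
  ["bit.ly".toList, "t.co".toList, "goo.gl".toList, "tinyurl.com".toList,
   "ow.ly".toList, "buff.ly".toList, "rebrand.ly".toList, "is.gd".toList,
   "t.ly".toList, "cutt.ly".toList, "mcaf.ee".toList, "s.id".toList,
   "lnkd.in".toList, "fb.me".toList, "yhoo.it".toList, "trib.al".toList,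
   "ift.tt".toList, "dlvr.it".toList, "supr.link".toList, "shorte.st".toList,
   "adf.ly".toList, "rb.gy".toList, "shorturl.at".toList, "bit.do".toList,
   "v.gd".toList, "qr.ae".toList, "amzn.to".toList, "m.tb.cn".toList,
   "vk.cc".toList, "x.co".toList, "u.to".toList, "clck.ru".toList,
   "2.gp".toList, "spr.ly".toList, "snip.ly".toList, "t.cn".toList,
   "t2m.io".toList, "urlz.fr".toList, "short.cm".toList, "kutt.it".toList]

def is_shortener (host : String) : Bool :=
  -- host = (host or "").lower().strip()
  let h := PySem.Chars.strip (PySem.Chars.lower host.toList)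
  if h.isEmpty then false
  else
    -- for dom in SHORTENER_DOMAINS: if host == dom or host.endswith("." + dom): return True
    shortenerDoms.any (fun dom => h == dom || PySem.Chars.endswith h ('.' :: dom))

-- ===== PORT B =====
-- the module-level set REV_LABELS: each domain as its labels in reverse order
def revLabelSeqs : List (List (List Char)) :=
  [["ly".toList, "bit".toList], ["co".toList, "t".toList],
   ["gl".toList, "goo".toList], ["com".toList, "tinyurl".toList],
   ["ly".toList, "ow".toList], ["ly".toList, "buff".toList],
   ["ly".toList, "rebrand".toList], ["gd".toList, "is".toList],
   ["ly".toList, "t".toList], ["ly".toList, "cutt".toList],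
   ["ee".toList, "mcaf".toList], ["id".toList, "s".toList],
   ["in".toList, "lnkd".toList], ["me".toList, "fb".toList],
   ["it".toList, "yhoo".toList], ["al".toList, "trib".toList],
   ["tt".toList, "ift".toList], ["it".toList, "dlvr".toList],
   ["link".toList, "supr".toList], ["st".toList, "shorte".toList],
   ["ly".toList, "adf".toList], ["gy".toList, "rb".toList],
   ["at".toList, "shorturl".toList], ["do".toList, "bit".toList],
   ["gd".toList, "v".toList], ["ae".toList, "qr".toList],
   ["to".toList, "amzn".toList], ["cn".toList, "tb".toList, "m".toList],
   ["cc".toList, "vk".toList], ["co".toList, "x".toList],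
   ["to".toList, "u".toList], ["ru".toList, "clck".toList],
   ["gp".toList, "2".toList], ["ly".toList, "spr".toList],
   ["ly".toList, "snip".toList], ["cn".toList, "t".toList],
   ["io".toList, "t2m".toList], ["fr".toList, "urlz".toList],
   ["cm".toList, "short".toList], ["it".toList, "kutt".toList]]

def is_shortener_alt (host : String) : Bool :=
  let h := PySem.Chars.strip (PySem.Chars.lower host.toList)
  if h.isEmpty then false
  else
    -- key = (); for label in reversed(host.split(".")):
    --   key = key + (label,); if key in REV_LABELS: return True
    (((PySem.Chars.splitOn h ['.']).reverse).foldl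
      (fun (st : List (List Char) × Bool) label =>
        let key := st.1 ++ [label]
        (key, st.2 || revLabelSeqs.contains key)) ([], false)).2

-- ===== PRECONDITION & SPEC =====
def Spec_is_shortener (host : String) (out : Bool) : Prop := out = is_shortener_alt host
instance (host : String) (out : Bool) : Decidable (Spec_is_shortener host out) := by unfold Spec_is_shortener; infer_instance

-- ===== CLAIM =====
def Claim_equal_is_shortener : Prop := ∀ (host : String), Dom_is_shortener host → Spec_is_shortener host (is_shortener host)

-- ===== LEMMAS AND PROOFS =====

-- a structural recursion equal to s.split('.')
def mySplit : List Char → List (List Char)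
  | [] => [[]]
  | c :: rest => if c = '.' then [] :: mySplit rest else (mySplit rest).modifyHead (c :: ·)

theorem mySplit_ne_nil (s : List Char) : mySplit s ≠ [] := by
  induction s with
  | nil => simp [mySplit]
  | cons c rest ih =>
    simp only [mySplit]
    split
    · simp
    · cases h : mySplit rest with
      | nil => exact absurd h ih
      | cons x xs => simp [List.modifyHead]

theorem splitOn_go_eq (fuel : Nat) (l cur : List Char) (acc : List (List Char))
    (hf : l.length ≤ fuel) :
    PySem.Chars.splitOn.go ['.'] fuel l cur acc
      = acc.reverse ++ (mySplit l).modifyHead (cur.reverse ++ ·) := by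
  induction fuel generalizing l cur acc with
  | zero =>
    have hl : l = [] := List.length_eq_zero_iff.mp (Nat.le_zero.mp hf)
    subst hl
    simp [PySem.Chars.splitOn.go, mySplit, List.modifyHead]
  | succ n ih =>
    cases l with
    | nil => simp [PySem.Chars.splitOn.go, mySplit, List.modifyHead]
    | cons c rest =>
      rw [PySem.Chars.splitOn.go]
      by_cases hc : c = '.'
      · subst hc
        have hpre : (['.'].isPrefixOf ('.' :: rest)) = true := by simp [List.isPrefixOf]
        rw [if_pos hpre]
        simp only [List.length_cons, List.length_nil, List.drop_succ_cons, List.drop_zero]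
        rw [ih rest [] (cur.reverse :: acc) (by simpa using Nat.succ_le_succ_iff.mp hf)]
        cases hm : mySplit rest with
        | nil => exact absurd hm (mySplit_ne_nil rest)
        | cons m ms =>
          simp [mySplit, hm, List.modifyHead]
      · have hpre : (['.'].isPrefixOf (c :: rest)) = false := by
          simp [List.isPrefixOf]
          intro h; exact absurd h.symm hc
        rw [if_neg (by simp [hpre])]
        rw [ih rest (c :: cur) acc (by simpa using Nat.succ_le_succ_iff.mp hf)]
        cases hm : mySplit rest with
        | nil => exact absurd hm (mySplit_ne_nil rest)
        | cons m ms =>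
          simp [mySplit, hc, hm, List.modifyHead]

theorem splitOn_eq_mySplit (s : List Char) :
    PySem.Chars.splitOn s ['.'] = mySplit s := by
  show PySem.Chars.splitOn.go _ _ _ _ _ = _
  rw [splitOn_go_eq (s.length + 1) s [] [] (by omega)]
  cases hm : mySplit s with
  | nil => exact absurd hm (mySplit_ne_nil s)
  | cons m ms => simp [List.modifyHead]

-- joining back with '.'
def joinDot : List (List Char) → List Char
  | [] => []
  | [x] => x
  | x :: y :: xs => x ++ '.' :: joinDot (y :: xs)

theorem joinDot_append (P Q : List (List Char)) (hP : P ≠ []) (hQ : Q ≠ []) :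
    joinDot (P ++ Q) = joinDot P ++ '.' :: joinDot Q := by
  induction P with
  | nil => exact absurd rfl hP
  | cons x P' ih =>
    cases P' with
    | nil =>
      cases Q with
      | nil => exact absurd rfl hQ
      | cons q qs => simp [joinDot]
    | cons y P'' =>
      have h := ih (by simp)
      simp only [List.cons_append, joinDot] at h ⊢
      rw [h]
      simp

theorem joinDot_mySplit (s : List Char) : joinDot (mySplit s) = s := by
  induction s with
  | nil => simp [mySplit, joinDot]
  | cons c rest ih =>
    by_cases hc : c = '.'
    · subst hc
      simp only [mySplit, if_pos]
      cases hm : mySplit rest with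
      | nil => exact absurd hm (mySplit_ne_nil rest)
      | cons m ms =>
        rw [hm] at ih
        simp [joinDot, ih]
    · simp only [mySplit, if_neg hc]
      cases hm : mySplit rest with
      | nil => exact absurd hm (mySplit_ne_nil rest)
      | cons m ms =>
        rw [hm] at ih
        cases ms with
        | nil => simpa [joinDot, List.modifyHead] using congrArg (c :: ·) ih
        | cons z zs =>
          simp only [joinDot, List.modifyHead] at ih ⊢
          rw [List.cons_append, ih]

theorem mySplit_append_dot (t d : List Char) :
    mySplit (t ++ '.' :: d) = mySplit t ++ mySplit d := by
  induction t with
  | nil => simp [mySplit]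
  | cons c t' ih =>
    by_cases hc : c = '.'
    · subst hc
      simp [mySplit, ih]
    · simp only [List.cons_append, mySplit, if_neg hc, ih]
      cases hm : mySplit t' with
      | nil => exact absurd hm (mySplit_ne_nil t')
      | cons m ms => simp [List.modifyHead]

theorem suffix_split_iff (h d : List Char) :
    (h = d ∨ ('.' :: d) <:+ h) ↔ mySplit d <:+ mySplit h := by
  constructor
  · rintro (rfl | ⟨t, rfl⟩)
    · exact List.suffix_refl _
    · rw [mySplit_append_dot]
      exact List.suffix_append _ _
  · rintro ⟨P, hP⟩
    cases P with
    | nil =>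
      left
      have hsd : mySplit d = mySplit h := by simpa using hP
      calc h = joinDot (mySplit h) := (joinDot_mySplit h).symm
        _ = joinDot (mySplit d) := by rw [hsd]
        _ = d := joinDot_mySplit d
    | cons p ps =>
      right
      refine ⟨joinDot (p :: ps), ?_⟩
      have : h = joinDot ((p :: ps) ++ mySplit d) := by
        rw [hP, joinDot_mySplit]
      rw [this, joinDot_append _ _ (by simp) (mySplit_ne_nil d), joinDot_mySplit]

theorem revLabelSeqs_eq :
    revLabelSeqs = shortenerDoms.map (fun d => (mySplit d).reverse) := by decide

theorem foldl_flag (ls : List (List Char)) (p : List (List Char)) (b : Bool) :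
    ((ls.foldl (fun (st : List (List Char) × Bool) label =>
        let key := st.1 ++ [label]
        (key, st.2 || revLabelSeqs.contains key)) (p, b)).2 = true)
      ↔ (b = true ∨ ∃ q, q ≠ [] ∧ q <+: ls ∧ (p ++ q) ∈ revLabelSeqs) := by
  induction ls generalizing p b with
  | nil => simp
  | cons x xs ih =>
    rw [List.foldl_cons]
    simp only []
    rw [ih]
    simp only [Bool.or_eq_true, List.contains_eq_mem, decide_eq_true_eq]
    constructor
    · rintro ((hb | hmem) | ⟨q, hq, hpre, hm⟩)
      · exact Or.inl hb
      · exact Or.inr ⟨[x], by simp, ⟨xs, rfl⟩, by simpa using hmem⟩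
      · exact Or.inr ⟨x :: q, by simp, (List.cons_prefix_cons).mpr ⟨rfl, hpre⟩,
          by simpa [List.append_assoc] using hm⟩
    · rintro (hb | ⟨q, hq, hpre, hm⟩)
      · exact Or.inl (Or.inl hb)
      · cases q with
        | nil => exact absurd rfl hq
        | cons y q' =>
          obtain ⟨rfl, hp'⟩ := (List.cons_prefix_cons).mp hpre
          cases q' with
          | nil => exact Or.inl (Or.inr (by simpa using hm))
          | cons z zs =>
            exact Or.inr ⟨z :: zs, by simp, hp', by simpa [List.append_assoc] using hm⟩

-- ===== VERDICT =====
theorem is_shortener_spec : Claim_equal_is_shortener := by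
  intro host _
  unfold Spec_is_shortener is_shortener is_shortener_alt
  simp only []
  split
  · rfl
  · rw [Bool.eq_iff_iff, splitOn_eq_mySplit, foldl_flag]
    simp only [List.any_eq_true, Bool.or_eq_true, beq_iff_eq, PySem.Chars.endswith_iff,
      Bool.false_eq_true, false_or, List.nil_append, revLabelSeqs_eq, List.mem_map]
    constructor
    · rintro ⟨dom, hdom, hcase⟩
      refine ⟨(mySplit dom).reverse, by simp [mySplit_ne_nil], ?_, ⟨dom, hdom, rfl⟩⟩
      rw [List.reverse_prefix]
      exact (suffix_split_iff _ dom).mp hcase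
    · rintro ⟨q, hq, hpre, ⟨dom, hdom, rfl⟩⟩
      exact ⟨dom, hdom, (suffix_split_iff _ dom).mpr (List.reverse_prefix.mp hpre)⟩
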